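-- pv_equiv track=rewrite | github.com/hoontaepark/Algorithm | 프로그래머스/입문/진료순서정하기.py | solution
-- ===== SOURCE A (Python) =====
-- def solution(emergency):
--     answer=[]
--     dic = {}
--     sorted_emergency = sorted(emergency, reverse=True)
--     for idx, val in enumerate(sorted_emergency, start=1):
--         dic[val] = idx
--     for i in emergency:
--         answer.append(dic.get(i))
--     return answer
-- ===== SOURCE B (Python) =====
-- def solution(emergency):
--     # rank = number of severities >= this one; no sort, no dict
--     return [sum(1 for x in emergency if x >= i) for i in emergency]
-- ===== Notes on version B (the rewrite author's own statement) =====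
-- stated objective: simpler
-- what changed: Replaces sort + dict-of-last-indices with a direct one-line count: each element's rank is the number of elements >= it (>= reproduces the dict-overwrite behaviour on duplicates).
import Mathlib
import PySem

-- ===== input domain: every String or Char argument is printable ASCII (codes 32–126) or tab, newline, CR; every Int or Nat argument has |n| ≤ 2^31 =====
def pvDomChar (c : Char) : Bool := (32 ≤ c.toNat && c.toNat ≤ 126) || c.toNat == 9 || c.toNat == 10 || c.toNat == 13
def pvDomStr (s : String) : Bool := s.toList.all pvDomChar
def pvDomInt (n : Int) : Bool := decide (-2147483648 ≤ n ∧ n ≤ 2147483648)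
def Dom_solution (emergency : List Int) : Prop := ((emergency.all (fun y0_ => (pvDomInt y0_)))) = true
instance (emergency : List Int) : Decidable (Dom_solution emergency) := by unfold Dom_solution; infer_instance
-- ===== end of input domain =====

-- B drops A's sort + dict and ranks each element by counting elements ≥ it (simpler, same behaviour incl. duplicates).

-- ===== PORT A =====
-- dic.get(i) always hits (every i of emergency is a key), so the getD default 0 is never used.
def solution (emergency : List Int) : List Int :=
  let sorted_emergency := PySem.List.sorted emergency (fun x => x) true
  let dic := (PySem.List.enumerate sorted_emergency 1).foldl
      (fun d p => d.insert p.2 p.1) PySem.Dict.empty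
  emergency.foldl (fun answer i => answer ++ [dic.getD i 0]) []

-- ===== PORT B =====
def solution_alt (emergency : List Int) : List Int :=
  emergency.map (fun i => ((emergency.countP (fun x => x ≥ i) : Nat) : Int))

-- ===== PRECONDITION & SPEC =====
def Spec_solution (emergency : List Int) (out : List Int) : Prop := out = solution_alt emergency
instance (emergency : List Int) (out : List Int) : Decidable (Spec_solution emergency out) := by unfold Spec_solution; infer_instance

-- ===== CLAIM (what is proved, stated in full; the proofs are below) =====
def Claim_equal_solution : Prop := ∀ (emergency : List Int), Dom_solution emergency → Spec_solution emergency (solution emergency)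

-- ===== LEMMAS AND PROOFS =====

-- the insert loop never touches a key outside s
theorem pv_fold_notmem (s : List Int) (n : Int) (d : PySem.Dict Int Int) (v : Int)
    (hv : v ∉ s) :
    ((PySem.List.enumerate s n).foldl (fun d p => d.insert p.2 p.1) d).getD v 0
      = d.getD v 0 := by
  induction s generalizing n d with
  | nil => simp [PySem.List.enumerate_nil]
  | cons a t ih =>
    simp only [PySem.List.enumerate_cons, List.foldl_cons]
    rw [ih (n + 1) _ (fun h => hv (List.mem_cons_of_mem _ h))]
    exact PySem.Dict.getD_insert_of_ne _ _ _ (fun h => hv (h ▸ List.mem_cons_self))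

-- on a descending list, the last index written for v is the count of elements ≥ v
theorem pv_fold_mem (s : List Int) (n : Int) (d : PySem.Dict Int Int) (v : Int)
    (hs : s.Pairwise (fun a b => b ≤ a)) (hv : v ∈ s) :
    ((PySem.List.enumerate s n).foldl (fun d p => d.insert p.2 p.1) d).getD v 0
      = n + (s.countP (fun x => x ≥ v) : Int) - 1 := by
  induction s generalizing n d with
  | nil => cases hv
  | cons a t ih =>
    rcases List.pairwise_cons.mp hs with ⟨hle, ht⟩
    simp only [PySem.List.enumerate_cons, List.foldl_cons]
    by_cases hvt : v ∈ t
    · rw [ih (n + 1) _ ht hvt]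
      have hva : v ≤ a := hle v hvt
      have : (a :: t).countP (fun x => x ≥ v) = t.countP (fun x => x ≥ v) + 1 := by
        simp [hva]
      rw [this]; push_cast; ring
    · have hva : v = a := by rcases List.mem_cons.mp hv with h | h; exact h; exact absurd h hvt
      subst hva
      rw [pv_fold_notmem t (n + 1) _ v hvt]
      rw [PySem.Dict.getD_insert_self]
      have h0 : t.countP (fun x => x ≥ v) = 0 := by
        rw [List.countP_eq_zero]
        intro x hx
        simp only [ge_iff_le, decide_eq_true_eq]
        intro hge
        exact hvt (le_antisymm (hle x hx) hge ▸ hx)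
      have : (v :: t).countP (fun x => x ≥ v) = 1 := by
        simp [h0]
      rw [this]; push_cast; ring

-- ===== VERDICT (by name: the statement is the Claim_ definition above) =====
theorem solution_spec : Claim_equal_solution := by
  intro emergency _
  show _ = _
  unfold solution solution_alt
  rw [PySem.List.foldl_append_singleton_eq_map]
  simp only [List.nil_append]
  apply List.map_congr_left
  intro i hi
  have hperm := PySem.List.sorted_perm emergency (fun x => x) true
  have hpw := PySem.List.sorted_pairwise_rev emergency (fun x => x)
  rw [pv_fold_mem _ 1 _ i hpw (hperm.mem_iff.mpr hi)]
  rw [hperm.countP_eq]; ring
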